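-- pv_equiv track=rewrite | github.com/MrBrantCode/unitest_baseline | mut_generate/mist_train_cf/cf_62358/solution.py | minimum_balance
-- ===== SOURCE A (Python) =====
-- def minimum_balance(operations):
--     minimum_balance = 0
--     current_balance = 0
--
--     for op in operations:
--         current_balance += op
--
--         if current_balance < minimum_balance:
--             minimum_balance = current_balance
--
--     return minimum_balance if minimum_balance < 0 else None
-- ===== SOURCE B (Python) =====
-- def minimum_balance(operations):
--     # Divide and conquer: each segment contributes (total sum, minimum prefix sum vs 0);
--     # segments combine as (s1+s2, min(m1, s1+m2)).
--     def go(seg):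
--         if len(seg) <= 1:
--             if not seg:
--                 return (0, 0)
--             op = seg[0]
--             return (op, min(op, 0))
--         k = len(seg) // 2
--         s1, m1 = go(seg[:k])
--         s2, m2 = go(seg[k:])
--         return (s1 + s2, min(m1, s1 + m2))
--     _, m = go(operations)
--     return m if m < 0 else None
-- ===== Notes on version B (the rewrite author's own statement) =====
-- stated objective: alternative
-- what changed: Replaces the sequential running-balance scan with a divide-and-conquer recursion: each half-segment is summarised as (segment sum, minimum prefix balance), and summaries are merged with (s1+s2, min(m1, s1+m2)).
import Mathlib
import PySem

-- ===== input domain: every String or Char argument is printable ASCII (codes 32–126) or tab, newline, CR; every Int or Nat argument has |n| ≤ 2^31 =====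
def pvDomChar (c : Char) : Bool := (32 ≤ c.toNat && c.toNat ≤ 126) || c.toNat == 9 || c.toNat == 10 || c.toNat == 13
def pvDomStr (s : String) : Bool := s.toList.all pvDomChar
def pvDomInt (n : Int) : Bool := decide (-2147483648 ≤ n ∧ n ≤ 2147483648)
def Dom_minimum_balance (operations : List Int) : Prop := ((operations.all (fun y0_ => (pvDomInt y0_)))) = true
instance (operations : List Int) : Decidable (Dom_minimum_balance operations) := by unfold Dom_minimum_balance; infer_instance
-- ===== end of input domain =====

-- B replaces A's sequential running-balance scan by a divide-and-conquer recursion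
-- over half-segments summarised as (segment sum, minimum prefix balance); same return value.

-- ===== PORT A =====
-- fused scan: state (minimum_balance, current_balance)
def minimum_balance (operations : List Int) : Option Int :=
  let s := operations.foldl (fun (s : Int × Int) op =>
    let cur := s.2 + op
    (if cur < s.1 then cur else s.1, cur)) (0, 0)
  if s.1 < 0 then some s.1 else none

-- ===== PORT B =====
-- go(seg) = (sum of seg, min(0, prefix balances of seg)), by splitting at len//2
def pvGo : List Int → Int × Int
  | [] => (0, 0)
  | [o] => (o, min o 0)
  | a :: b :: t =>
      let k := (a :: b :: t).length / 2
      let p := pvGo ((a :: b :: t).take k)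
      let q := pvGo ((a :: b :: t).drop k)
      (p.1 + q.1, min p.2 (p.1 + q.2))
termination_by l => l.length
decreasing_by
  · simp [List.length_take]; omega
  · simp [List.length_drop]; omega

def minimum_balance_alt (operations : List Int) : Option Int :=
  let r := pvGo operations
  if r.2 < 0 then some r.2 else none

-- ===== PRECONDITION & SPEC =====
def Spec_minimum_balance (operations : List Int) (out : Option Int) : Prop := out = minimum_balance_alt operations
instance (operations : List Int) (out : Option Int) : Decidable (Spec_minimum_balance operations out) := by unfold Spec_minimum_balance; infer_instance

-- ===== CLAIM (what is proved, stated in full; the proofs are below) =====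
def Claim_equal_minimum_balance : Prop := ∀ (operations : List Int), Dom_minimum_balance operations → Spec_minimum_balance operations (minimum_balance operations)

-- ===== LEMMAS AND PROOFS =====

-- prefix sums of ops starting from running balance c
def pvPsums (c : Int) : List Int → List Int
  | [] => []
  | o :: t => (c + o) :: pvPsums (c + o) t

-- A's fold computes the minimum of the prefix sums (with init m)
theorem pvFoldA (ops : List Int) : ∀ (m c : Int),
    (ops.foldl (fun (s : Int × Int) op =>
      let cur := s.2 + op
      (if cur < s.1 then cur else s.1, cur)) (m, c)).1
      = (pvPsums c ops).foldl min m := by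
  induction ops with
  | nil => intro m c; simp [pvPsums]
  | cons o t ih =>
      intro m c
      simp only [List.foldl, pvPsums]
      rw [ih]
      congr 1
      rw [min_comm]
      simp [min_def]
      omega

theorem pvPsums_append (a b : List Int) : ∀ (c : Int),
    pvPsums c (a ++ b) = pvPsums c a ++ pvPsums (c + a.sum) b := by
  induction a with
  | nil => intro c; simp [pvPsums]
  | cons o t ih =>
      intro c
      simp only [List.cons_append, pvPsums, ih, List.sum_cons]
      rw [show c + (o + t.sum) = c + o + t.sum from by ring]

theorem pvPsums_shift (l : List Int) : ∀ (c : Int),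
    pvPsums c l = (pvPsums 0 l).map (fun x => c + x) := by
  induction l with
  | nil => intro c; simp [pvPsums]
  | cons o t ih =>
      intro c
      simp only [pvPsums]
      rw [ih (c + o), ih (0 + o)]
      simp only [List.map_cons, List.map_map]
      refine List.cons_eq_cons.mpr ⟨by ring, ?_⟩
      apply List.map_congr_left; intro x _
      simp only [Function.comp_apply]; ring

theorem pvFoldMinMapAdd (xs : List Int) : ∀ (c m : Int),
    (xs.map (fun x => c + x)).foldl min (c + m) = c + xs.foldl min m := by
  induction xs with
  | nil => intro c m; simp
  | cons x t ih =>
      intro c m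
      simp only [List.map, List.foldl]
      rw [show min (c + m) (c + x) = c + min m x by omega]
      exact ih c (min m x)

theorem pvFoldMinLeInit (xs : List Int) : ∀ (m : Int), xs.foldl min m ≤ m := by
  induction xs with
  | nil => intro m; simp
  | cons x t ih =>
      intro m
      simp only [List.foldl]
      exact le_trans (ih (min m x)) (min_le_left _ _)

theorem pvFoldMinLeMem (xs : List Int) : ∀ (x : Int), x ∈ xs → ∀ (m : Int), xs.foldl min m ≤ x := by
  induction xs with
  | nil => intro x hx; cases hx
  | cons y t ih =>
      intro x hx m
      simp only [List.foldl]
      rcases List.mem_cons.mp hx with h | h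
      · exact le_trans (pvFoldMinLeInit t _) (h ▸ min_le_right _ _)
      · exact ih x h _

theorem pvFoldMinMin (xs : List Int) : ∀ (m m' : Int),
    xs.foldl min (min m m') = min m (xs.foldl min m') := by
  induction xs with
  | nil => intro m m'; simp
  | cons x t ih =>
      intro m m'
      simp only [List.foldl]
      rw [min_assoc, ih]

theorem pvSumMemPsums (a : List Int) (h : a ≠ []) : ∀ (c : Int), (c + a.sum) ∈ pvPsums c a := by
  induction a with
  | nil => exact absurd rfl h
  | cons o t ih =>
      intro c
      cases t with
      | nil => simp [pvPsums]
      | cons y s =>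
          rw [show pvPsums c (o :: y :: s) = (c + o) :: pvPsums (c + o) (y :: s) from rfl]
          apply List.mem_cons_of_mem
          have h2 : c + (o :: y :: s).sum = (c + o) + (y :: s).sum := by
            rw [List.sum_cons]; ring
          rw [h2]; exact ih (by simp) (c + o)

theorem pvMinLeSum (a : List Int) : (pvPsums 0 a).foldl min 0 ≤ a.sum := by
  cases a with
  | nil => simp [pvPsums]
  | cons o t =>
      have h := pvFoldMinLeMem (pvPsums 0 (o :: t)) (0 + (o :: t).sum)
        (pvSumMemPsums (o :: t) (by simp) 0) 0
      omega

-- key merge law: min-prefix-balance of a ++ b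
theorem pvMAppend (a b : List Int) :
    (pvPsums 0 (a ++ b)).foldl min 0
      = min ((pvPsums 0 a).foldl min 0) (a.sum + (pvPsums 0 b).foldl min 0) := by
  rw [pvPsums_append, List.foldl_append]
  set Ma := (pvPsums 0 a).foldl min 0 with hMa
  set S := a.sum with hS
  have hle : Ma ≤ S := pvMinLeSum a
  rw [show (0 : Int) + S = S by ring, pvPsums_shift b S,
      show Ma = S + (Ma - S) by ring, pvFoldMinMapAdd,
      show Ma - S = min (Ma - S) 0 by omega, pvFoldMinMin]
  set Mb := (pvPsums 0 b).foldl min 0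
  omega

theorem pvGoCorrect (l : List Int) : pvGo l = (l.sum, (pvPsums 0 l).foldl min 0) := by
  induction l using pvGo.induct with
  | case1 => simp [pvGo, pvPsums]
  | case2 o =>
      simp only [pvGo, pvPsums, List.foldl, List.sum_cons, List.sum_nil, Prod.mk.injEq]
      omega
  | case3 a b t k ih1 ih2 =>
      simp only [pvGo]
      rw [ih1, ih2]
      have hs : List.take k (a :: b :: t) ++ List.drop k (a :: b :: t) = a :: b :: t :=
        List.take_append_drop _ _
      dsimp only
      rw [Prod.mk.injEq]
      refine ⟨?_, ?_⟩
      · conv_rhs => rw [← hs]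
        rw [List.sum_append]
      · conv_rhs => rw [← hs]
        rw [pvMAppend]

-- ===== VERDICT (by name: the statement is the Claim_ definition above) =====
theorem minimum_balance_spec : Claim_equal_minimum_balance := by
  intro ops _
  unfold Spec_minimum_balance minimum_balance minimum_balance_alt
  simp only []
  rw [pvFoldA, pvGoCorrect]
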